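-- pv_equiv track=rewrite | github.com/Myoxsis/trading_bot_ogv | long_short.py | keep_first_signal
-- ===== SOURCE A (Python) =====
-- def keep_first_signal(signal_list):
--     result = []
--     in_sequence = False  # A flag to track if we are in a sequence of ones
--
--     for value in signal_list:
--         if value == 1:
--             if not in_sequence:
--                 result.append(1)
--                 in_sequence = True
--             else:
--                 result.append(0)
--         else:
--             result.append(0)
--             in_sequence = False
--
--     return result
-- ===== SOURCE B (Python) =====
-- from itertools import groupby
--
-- def keep_first_signal(signal_list):
--     result = []
--     for key, group in groupby(signal_list):
--         n = sum(1 for _ in group)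
--         if key == 1:
--             result.extend([1] + [0] * (n - 1))
--         else:
--             result.extend([0] * n)
--     return result
-- ===== Notes on version B (the rewrite author's own statement) =====
-- stated objective: idiomatic
-- what changed: B iterates over maximal runs of equal values via itertools.groupby and emits per run a single 1 followed by zeros (all zeros for a non-1 run), instead of A's per-element loop with an in_sequence flag.
import Mathlib
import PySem

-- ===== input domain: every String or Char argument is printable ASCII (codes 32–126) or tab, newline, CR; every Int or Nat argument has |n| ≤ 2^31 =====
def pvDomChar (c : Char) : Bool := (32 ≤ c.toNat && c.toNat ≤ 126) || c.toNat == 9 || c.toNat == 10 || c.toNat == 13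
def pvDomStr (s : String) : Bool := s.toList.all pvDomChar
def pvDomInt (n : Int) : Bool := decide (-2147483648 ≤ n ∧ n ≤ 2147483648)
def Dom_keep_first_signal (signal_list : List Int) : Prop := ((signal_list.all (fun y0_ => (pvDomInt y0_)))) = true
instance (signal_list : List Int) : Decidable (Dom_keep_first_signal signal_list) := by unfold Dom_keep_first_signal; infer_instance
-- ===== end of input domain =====

-- B traverses maximal runs of equal values (itertools.groupby) instead of A's per-element in_sequence flag; objective: idiomatic.


-- ===== PORT A =====
-- A's loop body: state = (result, in_sequence)
def pvStepA (st : List Int × Bool) (value : Int) : List Int × Bool :=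
  if value = 1 then
    if !st.2 then (st.1 ++ [1], true) else (st.1 ++ [0], st.2)
  else (st.1 ++ [0], false)

def keep_first_signal (signal_list : List Int) : List Int :=
  (signal_list.foldl pvStepA ([], false)).1

-- ===== PORT B =====
-- hand port of itertools.groupby (streaming: current key + run length so far)
def pvRunsAux (l : List Int) (k : Int) (n : Nat) : List (Int × Nat) :=
  match l with
  | [] => [(k, n)]
  | x :: xs => if x = k then pvRunsAux xs k (n + 1) else (k, n) :: pvRunsAux xs x 1

def pvRuns (l : List Int) : List (Int × Nat) :=
  match l with
  | [] => []
  | x :: xs => pvRunsAux xs x 1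

-- per-run emission: a 1 followed by n-1 zeros for a run of ones, n zeros otherwise
def pvEmit (kn : Int × Nat) : List Int :=
  if kn.1 = 1 then 1 :: List.replicate (kn.2 - 1) 0 else List.replicate kn.2 0

def keep_first_signal_alt (signal_list : List Int) : List Int :=
  (pvRuns signal_list).flatMap pvEmit

-- ===== PRECONDITION & SPEC =====
def Spec_keep_first_signal (signal_list : List Int) (out : List Int) : Prop := out = keep_first_signal_alt signal_list
instance (signal_list : List Int) (out : List Int) : Decidable (Spec_keep_first_signal signal_list out) := by unfold Spec_keep_first_signal; infer_instance

-- ===== CLAIM (what is proved, stated in full; the proofs are below) =====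
def Claim_equal_keep_first_signal : Prop := ∀ (signal_list : List Int), Dom_keep_first_signal signal_list → Spec_keep_first_signal signal_list (keep_first_signal signal_list)

-- ===== LEMMAS AND PROOFS =====

-- A's loop as a recursion emitting one output per element, flag-threaded
def pvAux (l : List Int) (b : Bool) : List Int :=
  match l with
  | [] => []
  | x :: xs => (if x = 1 then (if b then 0 else 1) else 0) :: pvAux xs (x = 1)

theorem pvAux_foldl (l : List Int) (acc : List Int) (b : Bool) :
    (l.foldl pvStepA (acc, b)).1 = acc ++ pvAux l b := by
  induction l generalizing acc b with
  | nil => simp [pvAux]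
  | cons x xs ih =>
    rw [List.foldl_cons]
    by_cases hx : x = 1
    · cases b
      · rw [show pvStepA (acc, false) x = (acc ++ [1], true) from by simp [pvStepA, hx]]
        rw [ih]; simp [pvAux, hx]
      · rw [show pvStepA (acc, true) x = (acc ++ [0], true) from by simp [pvStepA, hx]]
        rw [ih]; simp [pvAux, hx]
    · rw [show pvStepA (acc, b) x = (acc ++ [0], false) from by simp [pvStepA, hx]]
      rw [ih]; simp [pvAux, hx]

theorem pvEmit_eq (k : Int) (n : Nat) (hn : 1 ≤ n) :
    pvEmit (k, n) = (if k = 1 then 1 else 0) :: List.replicate (n - 1) 0 := by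
  by_cases hk : k = 1
  · simp [pvEmit, hk]
  · cases n with
    | zero => omega
    | succ m => simp [pvEmit, hk, List.replicate_succ]

theorem pvRunsAux_emit (xs : List Int) (k : Int) (n : Nat) (hn : 1 ≤ n) :
    (pvRunsAux xs k n).flatMap pvEmit
      = (if k = 1 then 1 else 0) :: (List.replicate (n - 1) 0 ++ pvAux xs (k = 1)) := by
  induction xs generalizing k n with
  | nil => simp [pvRunsAux, pvAux, pvEmit_eq k n hn]
  | cons x xs ih =>
    have hrep : List.replicate n (0 : Int) = List.replicate (n - 1) 0 ++ [0] := by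
      cases n with
      | zero => omega
      | succ m => simp [List.replicate_succ']
    by_cases hx : x = k
    · subst hx
      have hstep : pvRunsAux (x :: xs) x n = pvRunsAux xs x (n + 1) := by
        simp [pvRunsAux]
      have h1 : (pvRunsAux xs x (n + 1)).flatMap pvEmit
          = (if x = 1 then 1 else 0) :: (List.replicate n 0 ++ pvAux xs (x = 1)) := by
        simpa using ih x (n + 1) (by omega)
      have hp : pvAux (x :: xs) (decide (x = 1)) = 0 :: pvAux xs (decide (x = 1)) := by
        by_cases hx1 : x = 1 <;> simp [pvAux, hx1]
      rw [hstep, h1, hp, hrep]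
      simp [List.append_assoc]
    · have hstep : pvRunsAux (x :: xs) k n = (k, n) :: pvRunsAux xs x 1 := by
        simp [pvRunsAux, hx]
      have h1 : (pvRunsAux xs x 1).flatMap pvEmit
          = (if x = 1 then 1 else 0) :: (List.replicate 0 0 ++ pvAux xs (x = 1)) := by
        simpa using ih x 1 (by omega)
      have hp : pvAux (x :: xs) (decide (k = 1))
          = (if x = 1 then 1 else 0) :: pvAux xs (decide (x = 1)) := by
        by_cases hx1 : x = 1
        · have hk : ¬ k = 1 := fun h => hx (by rw [hx1, h])
          simp [pvAux, hx1, hk]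
        · simp [pvAux, hx1]
      rw [hstep, List.flatMap_cons, h1, hp, pvEmit_eq k n hn]
      simp

theorem pvAux_eq_alt (l : List Int) : pvAux l false = keep_first_signal_alt l := by
  cases l with
  | nil => rfl
  | cons x xs =>
    have h := pvRunsAux_emit xs x 1 (by omega)
    show pvAux (x :: xs) false = (pvRunsAux xs x 1).flatMap pvEmit
    rw [h]
    by_cases hx : x = 1 <;> simp [pvAux, hx]

-- ===== VERDICT (by name: the statement is the Claim_ definition above) =====
theorem keep_first_signal_spec : Claim_equal_keep_first_signal := by
  intro l _
  unfold Spec_keep_first_signal keep_first_signal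
  rw [pvAux_foldl l [] false]
  simpa using pvAux_eq_alt l
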